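-- pv_equiv track=rewrite | github.com/mrigankpawagi/ProbeableProblems | code/q3/buggy/4_1.py | min_freq
-- ===== SOURCE A (Python) =====
-- def min_freq(lst):
--     # Create a dictionary to store the frequency of each element
--     freq_dict = {}
--
--     # Iterate through the list and update the frequency dictionary
--     for elem in lst:
--         if elem in freq_dict:
--             freq_dict[elem] += 1
--         else:
--             freq_dict[elem] = 1
--
--     # Find the element with the minimum frequency and minimum index
--     min_freq_elem = min(lst, key=lambda x: (freq_dict[x], lst.index(x)))
--
--     return min_freq_elem
-- ===== SOURCE B (Python) =====
-- def min_freq(lst):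
--     # One counting pass; then pick the minimum over the distinct keys only.
--     # Dict insertion order = first-occurrence order, so min() over the keys
--     # resolves frequency ties by first index without any lst.index scan.
--     freq_dict = {}
--     for elem in lst:
--         freq_dict[elem] = freq_dict.get(elem, 0) + 1
--     return min(freq_dict, key=freq_dict.get)
-- ===== Notes on version B (the rewrite author's own statement) =====
-- stated objective: faster
-- what changed: B drops the min-over-the-whole-list with tuple key (freq, lst.index) and instead takes the min over the dict's distinct keys by count alone, relying on dict insertion order (= first-occurrence order) for the tie-break, so the O(n) lst.index scan inside the key function disappears.
import Mathlib
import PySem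

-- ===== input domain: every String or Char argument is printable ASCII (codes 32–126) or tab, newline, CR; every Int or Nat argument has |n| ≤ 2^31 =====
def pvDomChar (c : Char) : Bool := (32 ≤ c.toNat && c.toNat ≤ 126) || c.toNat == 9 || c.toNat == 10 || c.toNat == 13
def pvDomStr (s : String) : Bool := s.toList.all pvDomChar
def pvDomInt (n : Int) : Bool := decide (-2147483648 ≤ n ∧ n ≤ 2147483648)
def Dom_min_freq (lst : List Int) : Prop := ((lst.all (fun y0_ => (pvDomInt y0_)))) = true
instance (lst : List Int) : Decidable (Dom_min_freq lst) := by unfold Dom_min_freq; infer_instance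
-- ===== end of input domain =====

-- B replaces A's min over the whole list with tuple key (count, lst.index) by a single
-- counting pass plus a min over the distinct dict keys; first-occurrence insertion order
-- is the tie-break, so no lst.index scans are needed (measured faster in a timing run).

-- ===== PORT A =====
def min_freq (lst : List Int) : Int :=
  let freq_dict := lst.foldl (fun d elem =>
      if d.contains elem then d.insert elem ((d.get? elem).getD 0 + 1)
      else d.insert elem 1) PySem.Dict.empty
  -- min(lst, key=lambda x: (freq_dict[x], lst.index(x))): tuple key → min2?.
  -- The `.getD 0` defaults are unreachable: every x ∈ lst is a key of freq_dict and
  -- index? finds it; min2? = none only for lst = [], where Python's min raises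
  -- ValueError — excluded by Pre_min_freq.
  (PySem.List.min2? lst (fun x => ((freq_dict.get? x).getD 0 : Int))
      (fun x => (PySem.List.index? lst x).getD 0)).getD 0

-- ===== PORT B =====
def min_freq_alt (lst : List Int) : Int :=
  let freq_dict : PySem.Dict Int Int :=
    lst.foldl (fun d elem => d.insert elem (d.getD elem 0 + 1)) PySem.Dict.empty
  -- min(freq_dict, key=freq_dict.get): min over the keys in insertion order.
  -- `.getD 0` default unreachable; min? = none only when lst = [] (excluded by Pre_).
  (PySem.List.min? freq_dict.keys (fun k => freq_dict.getD k 0)).getD 0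

-- ===== PRECONDITION & SPEC =====
-- Pre_ excludes only the empty list, on which A's min() raises ValueError (B's does too).
def Pre_min_freq (lst : List Int) : Prop := lst ≠ []
instance (lst : List Int) : Decidable (Pre_min_freq lst) := by unfold Pre_min_freq; infer_instance
def pvWitness_min_freq : List Int := [1, 2, 2]
def Spec_min_freq (lst : List Int) (out : Int) : Prop := out = min_freq_alt lst
instance (lst : List Int) (out : Int) : Decidable (Spec_min_freq lst out) := by unfold Spec_min_freq; infer_instance

-- ===== CLAIM (what is proved, stated in full; the proofs are below) =====
def Claim_equal_min_freq : Prop := ∀ (lst : List Int), Dom_min_freq lst → Pre_min_freq lst → Spec_min_freq lst (min_freq lst)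

-- ===== LEMMAS AND PROOFS =====

-- idxOf? on a member is some of idxOf
theorem pv_idxOf?_eq (l : List Int) (a : Int) :
    List.idxOf? a l = if a ∈ l then some (List.idxOf a l) else none := by
  induction l with
  | nil => simp
  | cons x t ih =>
    rw [List.idxOf?_cons]
    by_cases hx : x = a
    · subst hx; simp
    · simp only [beq_iff_eq, hx, if_false, ih, List.idxOf_cons_ne _ (by exact hx), List.mem_cons]
      by_cases hm : a ∈ t <;> simp [hm, Ne.symm hx, Nat.succ_eq_add_one]

-- two members with the same first index are equal
theorem pv_idxOf_inj (l : List Int) (a b : Int) (ha : a ∈ l) (hb : b ∈ l)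
    (h : List.idxOf a l = List.idxOf b l) : a = b := by
  have h1 := List.getElem_idxOf (xs := l) (x := a) (List.idxOf_lt_length_of_mem ha)
  have h2 := List.getElem_idxOf (xs := l) (x := b) (List.idxOf_lt_length_of_mem hb)
  rw [← h1, ← h2]
  congr 1

-- the distinct elements in first-occurrence order have strictly increasing first indices
theorem pv_pairwise_idxOf (lst : List Int) :
    (PySem.Set.ofList lst).Pairwise (fun a b => List.idxOf a lst < List.idxOf b lst) := by
  induction lst with
  | nil => simp [PySem.Set.ofList_nil]
  | cons x t ih =>
    rw [PySem.Set.ofList_cons]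
    constructor
    · intro b hb
      have hbm : b ∈ PySem.Set.ofList t ∧ b ≠ x := by
        simpa [PySem.Set.mem_discard] using hb
      rw [List.idxOf_cons_self, List.idxOf_cons_ne t (Ne.symm hbm.2)]
      omega
    · have hp : (PySem.Set.discard (PySem.Set.ofList t) x).Pairwise
          (fun a b => List.idxOf a t < List.idxOf b t) :=
        List.Pairwise.sublist (List.filter_sublist (l := PySem.Set.ofList t)) ih
      refine hp.imp_of_mem ?_
      intro a b hma hmb hr
      have hax : a ≠ x := by
        have h' : a ∈ PySem.Set.ofList t ∧ a ≠ x := by simpa [PySem.Set.mem_discard] using hma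
        exact h'.2
      have hbx : b ≠ x := by
        have h' : b ∈ PySem.Set.ofList t ∧ b ≠ x := by simpa [PySem.Set.mem_discard] using hmb
        exact h'.2
      rw [List.idxOf_cons_ne t (Ne.symm hax), List.idxOf_cons_ne t (Ne.symm hbx)]
      omega

-- one step of A's min2? fold
theorem pv_min2_cons_cons (k1 : Int → Int) (k2 : Int → Nat) (a x : Int) (t : List Int) :
    PySem.List.min2? (a :: x :: t) k1 k2 =
      PySem.List.min2?
        ((if (decide (k1 x < k1 a) || !decide (k1 a < k1 x) && decide (k2 x < k2 a)) = true
          then x else a) :: t) k1 k2 := by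
  by_cases hc : (decide (k1 x < k1 a) || !decide (k1 a < k1 x) && decide (k2 x < k2 a)) = true
  · rw [if_pos hc]
    have hc' : k1 x < k1 a ∨ (k1 x ≤ k1 a ∧ k2 x < k2 a) := by simpa using hc
    simp [PySem.List.min2?, List.foldl_cons, hc']
  · rw [if_neg hc]
    have hc' : ¬(k1 x < k1 a ∨ (k1 x ≤ k1 a ∧ k2 x < k2 a)) := by simpa using hc
    simp [PySem.List.min2?, List.foldl_cons, hc']

-- A's min2? is some on a nonempty list
theorem pv_min2_some (k1 : Int → Int) (k2 : Int → Nat) :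
    ∀ (t : List Int) (a : Int), ∃ m, PySem.List.min2? (a :: t) k1 k2 = some m := by
  intro t
  induction t with
  | nil => intro a; exact ⟨a, rfl⟩
  | cons x t ih =>
    intro a
    rw [pv_min2_cons_cons]
    by_cases hc : (decide (k1 x < k1 a) || !decide (k1 a < k1 x) && decide (k2 x < k2 a)) = true
    · rw [if_pos hc]; exact ih x
    · rw [if_neg hc]; exact ih a

-- weak first-min spec for A's min2? (the result is lexicographically ≤ every element)
theorem pv_min2_spec (k1 : Int → Int) (k2 : Int → Nat) :
    ∀ (t : List Int) (a m : Int), PySem.List.min2? (a :: t) k1 k2 = some m →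
      m ∈ a :: t ∧ ∀ y ∈ a :: t, k1 m < k1 y ∨ (k1 m = k1 y ∧ k2 m ≤ k2 y) := by
  intro t
  induction t with
  | nil =>
    intro a m h
    have h' : a = m := by simpa [PySem.List.min2?] using h
    subst h'
    exact ⟨List.mem_cons_self, by intro y hy; rcases List.mem_cons.mp hy with rfl | hy
                                  · exact Or.inr ⟨rfl, le_refl _⟩
                                  · simp at hy⟩
  | cons x t ih =>
    intro a m h
    rw [pv_min2_cons_cons] at h
    by_cases hc : (decide (k1 x < k1 a) || !decide (k1 a < k1 x) && decide (k2 x < k2 a)) = true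
    · rw [if_pos hc] at h
      have hc' : k1 x < k1 a ∨ (¬ k1 a < k1 x ∧ k2 x < k2 a) := by simpa using hc
      obtain ⟨hm, hall⟩ := ih x m h
      have hmx := hall x List.mem_cons_self
      refine ⟨?_, ?_⟩
      · rcases List.mem_cons.mp hm with rfl | hm
        · exact List.mem_cons_of_mem _ List.mem_cons_self
        · exact List.mem_cons_of_mem _ (List.mem_cons_of_mem _ hm)
      · intro y hy
        rcases List.mem_cons.mp hy with rfl | hy
        · rcases hmx with h1 | ⟨h1, h2⟩ <;> rcases hc' with h3 | ⟨h3, h4⟩ <;> omega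
        · exact hall y hy
    · rw [if_neg hc] at h
      have hc' : ¬(k1 x < k1 a ∨ (¬ k1 a < k1 x ∧ k2 x < k2 a)) := by simpa using hc
      obtain ⟨hm, hall⟩ := ih a m h
      have hma := hall a List.mem_cons_self
      refine ⟨?_, ?_⟩
      · rcases List.mem_cons.mp hm with rfl | hm
        · exact List.mem_cons_self
        · exact List.mem_cons_of_mem _ (List.mem_cons_of_mem _ hm)
      · intro y hy
        rcases List.mem_cons.mp hy with rfl | hy
        · exact hma
        · rcases List.mem_cons.mp hy with rfl | hy
          · obtain ⟨h3, h4⟩ := not_or.mp hc'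
            rcases hma with h1 | ⟨h1, h2⟩ <;> omega
          · exact hall y (List.mem_cons_of_mem _ hy)

-- one step of B's min? fold
theorem pv_min1_cons_cons (key : Int → Int) (a x : Int) (t : List Int) :
    PySem.List.min? (a :: x :: t) key =
      PySem.List.min? ((if key x < key a then x else a) :: t) key := by
  by_cases hc : key x < key a <;> simp [PySem.List.min?, List.foldl_cons, hc]

-- first-min spec for B's min? over a list with strictly increasing rank r:
-- the kept element is the FIRST minimum, so ties resolve to the smaller rank
theorem pv_min1_spec (key : Int → Int) (r : Int → Nat) :
    ∀ (t : List Int) (a m : Int), (a :: t).Pairwise (fun u v => r u < r v) →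
      PySem.List.min? (a :: t) key = some m →
      m ∈ a :: t ∧ ∀ y ∈ a :: t, key m < key y ∨ (key m = key y ∧ r m ≤ r y) := by
  intro t
  induction t with
  | nil =>
    intro a m _ h
    have h' : a = m := by simpa [PySem.List.min?] using h
    subst h'
    refine ⟨List.mem_cons_self, ?_⟩
    intro y hy
    rcases List.mem_cons.mp hy with rfl | hy
    · exact Or.inr ⟨rfl, le_refl _⟩
    · simp at hy
  | cons x t ih =>
    intro a m hp h
    rw [pv_min1_cons_cons] at h
    have hrax : r a < r x := (List.pairwise_cons.mp hp).1 x List.mem_cons_self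
    have hrat : ∀ y ∈ t, r a < r y :=
      fun y hy => (List.pairwise_cons.mp hp).1 y (List.mem_cons_of_mem _ hy)
    have hrxt : ∀ y ∈ t, r x < r y :=
      (List.pairwise_cons.mp (List.pairwise_cons.mp hp).2).1
    have hpt : t.Pairwise (fun u v => r u < r v) :=
      (List.pairwise_cons.mp (List.pairwise_cons.mp hp).2).2
    by_cases hc : key x < key a
    · rw [if_pos hc] at h
      obtain ⟨hm, hall⟩ := ih x m (List.pairwise_cons.mpr ⟨hrxt, hpt⟩) h
      have hmx := hall x List.mem_cons_self
      refine ⟨?_, ?_⟩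
      · rcases List.mem_cons.mp hm with rfl | hm
        · exact List.mem_cons_of_mem _ List.mem_cons_self
        · exact List.mem_cons_of_mem _ (List.mem_cons_of_mem _ hm)
      · intro y hy
        rcases List.mem_cons.mp hy with rfl | hy
        · rcases hmx with h1 | ⟨h1, h2⟩ <;> left <;> omega
        · exact hall y hy
    · rw [if_neg hc] at h
      obtain ⟨hm, hall⟩ := ih a m (List.pairwise_cons.mpr ⟨hrat, hpt⟩) h
      have hma := hall a List.mem_cons_self
      refine ⟨?_, ?_⟩
      · rcases List.mem_cons.mp hm with rfl | hm
        · exact List.mem_cons_self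
        · exact List.mem_cons_of_mem _ (List.mem_cons_of_mem _ hm)
      · intro y hy
        rcases List.mem_cons.mp hy with rfl | hy
        · exact hma
        · rcases List.mem_cons.mp hy with rfl | hy
          · rcases hma with h1 | ⟨h1, h2⟩ <;> omega
          · exact hall y (List.mem_cons_of_mem _ hy)

-- A's freq-building loop is pointwise the plain counting loop of B
theorem pv_foldA_eq (lst : List Int) :
    lst.foldl (fun (d : PySem.Dict Int Int) elem =>
        if d.contains elem then d.insert elem ((d.get? elem).getD 0 + 1)
        else d.insert elem 1) PySem.Dict.empty
      = lst.foldl (fun d elem => d.insert elem (d.getD elem 0 + 1)) PySem.Dict.empty := by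
  have hfun : (fun (d : PySem.Dict Int Int) elem =>
      if d.contains elem then d.insert elem ((d.get? elem).getD 0 + 1)
      else d.insert elem 1)
      = (fun (d : PySem.Dict Int Int) elem => d.insert elem (d.getD elem 0 + 1)) := by
    funext d e
    by_cases h : d.contains e
    · simp [h, PySem.Dict.getD_eq_get?_getD]
    · have h0 : d.getD e 0 = 0 :=
        PySem.Dict.getD_of_not_contains d 0 (by simpa using h)
      simp [h, h0]
  rw [hfun]

-- ===== VERDICT (by name: the statement is the Claim_ definition above) =====
theorem min_freq_spec : Claim_equal_min_freq := by
  intro lst _ hpre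
  unfold Spec_min_freq
  cases lst with
  | nil => exact absurd rfl hpre
  | cons x t =>
    simp only [min_freq, min_freq_alt, pv_foldA_eq]
    set F : PySem.Dict Int Int :=
      (x :: t).foldl (fun d elem => d.insert elem (d.getD elem 0 + 1)) PySem.Dict.empty with hF
    have hcnt : ∀ v : Int, F.getD v 0 = ((x :: t).count v : Int) := by
      intro v
      rw [hF, PySem.Dict.getD_foldl_insert_add_one, PySem.Dict.getD_empty]
      omega
    have hkeys : F.keys = PySem.Set.ofList (x :: t) := by
      rw [hF, PySem.Dict.keys_foldl_insert, PySem.Dict.keys_empty, PySem.Set.update_nil_left]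
    have hget : ∀ z : Int, ((F.get? z).getD 0 : Int) = ((x :: t).count z : Int) := by
      intro z
      rw [← PySem.Dict.getD_eq_get?_getD]
      exact hcnt z
    have hidx : ∀ y ∈ x :: t, (PySem.List.index? (x :: t) y).getD 0 = List.idxOf y (x :: t) := by
      intro y hy
      rw [PySem.List.index?_eq_idxOf?, pv_idxOf?_eq, if_pos hy]
      rfl
    -- A's minimum
    obtain ⟨m1, hm1⟩ := pv_min2_some (fun z => ((F.get? z).getD 0 : Int))
      (fun z => (PySem.List.index? (x :: t) z).getD 0) t x
    obtain ⟨hA1, hA2⟩ := pv_min2_spec _ _ t x m1 hm1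
    -- B's minimum
    obtain ⟨m2, hm2⟩ : ∃ m2, PySem.List.min? F.keys (fun k => F.getD k 0) = some m2 := by
      cases hmm : PySem.List.min? F.keys (fun k => F.getD k 0) with
      | none =>
        have : F.keys = [] := (PySem.List.min?_eq_none_iff _ _).mp hmm
        rw [hkeys, PySem.Set.ofList_cons] at this
        simp at this
      | some m2 => exact ⟨m2, rfl⟩
    have hm2' : PySem.List.min? (x :: PySem.Set.discard (PySem.Set.ofList t) x)
        (fun k => F.getD k 0) = some m2 := by
      rw [← PySem.Set.ofList_cons, ← hkeys]; exact hm2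
    have hpair : (x :: PySem.Set.discard (PySem.Set.ofList t) x).Pairwise
        (fun u v => List.idxOf u (x :: t) < List.idxOf v (x :: t)) := by
      rw [← PySem.Set.ofList_cons]; exact pv_pairwise_idxOf (x :: t)
    obtain ⟨hB1, hB2⟩ := pv_min1_spec (fun k => F.getD k 0)
      (fun y => List.idxOf y (x :: t)) _ x m2 hpair hm2'
    have hB1' : m2 ∈ x :: t := by
      have : m2 ∈ PySem.Set.ofList (x :: t) := by rw [PySem.Set.ofList_cons]; exact hB1
      exact (PySem.Set.mem_ofList _ _).mp this
    have hA1' : m1 ∈ x :: PySem.Set.discard (PySem.Set.ofList t) x := by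
      rw [← PySem.Set.ofList_cons]
      exact (PySem.Set.mem_ofList _ _).mpr hA1
    -- compare the two minima
    have c1 := hA2 m2 hB1'
    have c2 := hB2 m1 hA1'
    rw [hget m1, hget m2, hidx m1 hA1, hidx m2 hB1'] at c1
    rw [hcnt m1, hcnt m2] at c2
    have hidxeq : List.idxOf m1 (x :: t) = List.idxOf m2 (x :: t) := by
      rcases c1 with c1 | ⟨c11, c12⟩ <;> rcases c2 with c2 | ⟨c21, c22⟩ <;> omega
    rw [hm1, hm2, pv_idxOf_inj (x :: t) m1 m2 hA1 hB1' hidxeq]
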